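-- pv_equiv track=rewrite | github.com/Mael-zys/PhysMoDPO | OmniControl/eval/eval_control_error_h1.py | _iter_motion_key_candidates
-- ===== SOURCE A (Python) =====
-- def _iter_motion_key_candidates(motion_key, max_trim_steps=4):
--     key = str(motion_key)
--     out = [key]
--     current = key
--     for _ in range(max_trim_steps):
--         if "_" not in current:
--             break
--         current = current.rsplit("_", 1)[0]
--         out.append(current)
--     # deduplicate while preserving order
--     dedup = []
--     seen = set()
--     for item in out:
--         if item in seen:
--             continue
--         seen.add(item)
--         dedup.append(item)
--     return dedup
-- ===== SOURCE B (Python) =====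
-- def _iter_motion_key_candidates(motion_key, max_trim_steps=4):
--     key = str(motion_key)
--     cuts = [i for i, c in enumerate(key) if c == "_"]
--     steps = max(0, max_trim_steps)
--     return [key] + [key[:p] for p in cuts[::-1][:steps]]
-- ===== Notes on version B (the rewrite author's own statement) =====
-- stated objective: alternative
-- what changed: B finds all underscore positions in one enumerate pass and emits the prefixes at those positions directly (key[:p] for the positions in decreasing order, capped at max_trim_steps), replacing A's loop of repeated rsplit trims and its dedup pass, which is unnecessary since the prefixes strictly shrink.
import Mathlib
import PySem

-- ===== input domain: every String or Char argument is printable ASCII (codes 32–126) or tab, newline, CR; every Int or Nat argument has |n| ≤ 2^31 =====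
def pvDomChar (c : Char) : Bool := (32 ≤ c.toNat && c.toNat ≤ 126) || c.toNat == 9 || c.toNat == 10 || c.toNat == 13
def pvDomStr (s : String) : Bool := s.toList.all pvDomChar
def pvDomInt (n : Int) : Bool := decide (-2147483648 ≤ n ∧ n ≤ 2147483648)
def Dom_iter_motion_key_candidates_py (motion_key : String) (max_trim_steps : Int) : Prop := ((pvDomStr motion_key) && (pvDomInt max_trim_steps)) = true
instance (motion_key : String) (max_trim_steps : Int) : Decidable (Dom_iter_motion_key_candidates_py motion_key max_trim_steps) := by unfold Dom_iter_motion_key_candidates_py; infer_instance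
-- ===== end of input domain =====

-- B replaces A's repeated-rsplit trimming loop plus dedup pass by collecting the underscore
-- positions once and emitting the corresponding prefixes directly (alternative decomposition).

-- ===== PORT A =====
-- hand port of current.rsplit("_", 1)[0] (no PySem rsplit): scan from the right past the last
-- '_' and keep what precedes it; exact whenever '_' occurs in cs (the only case A reaches it)
def pvTrimA (cs : List Char) : List Char :=
  ((cs.reverse.dropWhile (fun c => !(c == '_'))).drop 1).reverse

-- the 'for _ in range(max_trim_steps)' loop; fuel = number of iterations (0 if negative)
def pvLoopA : Nat → List Char → List (List Char) → List (List Char)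
  | 0, _, out => out
  | k+1, cur, out =>
    if cur.contains '_' = false then out        -- '"_" not in current' (single-char substring)
    else
      let c := pvTrimA cur
      pvLoopA k c (out ++ [c])

-- the dedup loop, with 'seen' a Python set
def pvDedupA : List (List Char) → PySem.Set (List Char) → List (List Char) → List (List Char)
  | [], _, dedup => dedup
  | x :: t, seen, dedup =>
    if seen.contains x then pvDedupA t seen dedup
    else pvDedupA t (seen.add x) (dedup ++ [x])

def iter_motion_key_candidates_py (motion_key : String) (max_trim_steps : Int) : List String :=
  let key := motion_key.toList                  -- str(motion_key) = motion_key (already a str)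
  let out := pvLoopA max_trim_steps.toNat key [key]
  (pvDedupA out PySem.Set.empty []).map String.mk

-- ===== PORT B =====
def iter_motion_key_candidates_py_alt (motion_key : String) (max_trim_steps : Int) : List String :=
  let key := motion_key.toList
  let cuts := ((PySem.List.enumerate key).filter (fun p => p.2 == '_')).map Prod.fst
  let steps := max 0 max_trim_steps
  String.mk key ::
    (PySem.List.slice cuts.reverse none (some steps)).map   -- cuts[::-1][:steps]; [::-1] = reverse
      (fun p => String.mk (PySem.Chars.slice key none (some p)))   -- key[:p]

-- ===== PRECONDITION & SPEC =====
def Spec_iter_motion_key_candidates_py (motion_key : String) (max_trim_steps : Int) (out : List String) : Prop := out = iter_motion_key_candidates_py_alt motion_key max_trim_steps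
instance (motion_key : String) (max_trim_steps : Int) (out : List String) : Decidable (Spec_iter_motion_key_candidates_py motion_key max_trim_steps out) := by unfold Spec_iter_motion_key_candidates_py; infer_instance

-- ===== CLAIM (what is proved, stated in full; the proofs are below) =====
def Claim_equal_iter_motion_key_candidates_py : Prop := ∀ (motion_key : String) (max_trim_steps : Int), Dom_iter_motion_key_candidates_py motion_key max_trim_steps → Spec_iter_motion_key_candidates_py motion_key max_trim_steps (iter_motion_key_candidates_py motion_key max_trim_steps)

-- ===== LEMMAS AND PROOFS =====

-- list of underscore positions, in increasing order
def pvPosns : List Char → List Nat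
  | [] => []
  | c :: t => (if c == '_' then [0] else []) ++ (pvPosns t).map (· + 1)

theorem pvPosns_sorted (cs : List Char) : (pvPosns cs).Pairwise (· < ·) := by
  induction cs with
  | nil => simp [pvPosns]
  | cons c t ih =>
    by_cases h : c == '_' <;>
      simp only [pvPosns, h, if_pos, if_neg, List.nil_append, List.singleton_append] <;>
      [skip; exact ih.map _ (fun a b hab => by omega)]
    refine List.Pairwise.cons ?_ (ih.map _ (fun a b hab => by omega))
    intro x hx
    simp only [List.mem_map] at hx
    obtain ⟨i, _, rfl⟩ := hx
    omega

theorem pvPosns_lt_length (cs : List Char) : ∀ q ∈ pvPosns cs, q < cs.length := by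
  induction cs with
  | nil => simp [pvPosns]
  | cons c t ih =>
    intro q hq
    simp only [pvPosns, List.mem_append, List.mem_map] at hq
    rcases hq with hq | ⟨i, hi, rfl⟩
    · by_cases h : c == '_' <;> simp [h] at hq
      simp [hq]
    · have := ih i hi; simp; omega

theorem pvPosns_nil_iff (cs : List Char) : pvPosns cs = [] ↔ cs.contains '_' = false := by
  induction cs with
  | nil => simp [pvPosns]
  | cons c t ih =>
    by_cases h : c == '_'
    · simp [pvPosns, eq_of_beq h]
    · have h' : ¬ c = '_' := by simpa using h
      simp [pvPosns, h, ih]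
      exact fun _ => Ne.symm h'

theorem pvPosns_getD (cs : List Char) : ∀ q ∈ pvPosns cs, cs.getD q ' ' = '_' := by
  induction cs with
  | nil => simp [pvPosns]
  | cons c t ih =>
    intro q hq
    simp only [pvPosns, List.mem_append, List.mem_map] at hq
    rcases hq with hq | ⟨i, hi, rfl⟩
    · by_cases h : c == '_' <;> simp [h] at hq
      simp [hq, eq_of_beq h]
    · simpa using ih i hi

theorem pvPosns_complete (cs : List Char) : ∀ q, q < cs.length → cs.getD q ' ' = '_' → q ∈ pvPosns cs := by
  induction cs with
  | nil => simp
  | cons c t ih =>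
    intro q hlt hc
    cases q with
    | zero =>
      have hc' : c = '_' := by simpa using hc
      simp [pvPosns, hc']
    | succ n =>
      simp only [List.length_cons] at hlt
      have hmem := ih n (by omega) (by simpa using hc)
      simp only [pvPosns, List.mem_append, List.mem_map]
      exact Or.inr ⟨n, hmem, rfl⟩

theorem pvPosns_take (cs : List Char) (n : Nat) :
    pvPosns (cs.take n) = (pvPosns cs).filter (fun i => i < n) := by
  induction cs generalizing n with
  | nil => simp [pvPosns]
  | cons c t ih =>
    cases n with
    | zero =>
      simp only [List.take_zero, pvPosns]
      rw [List.filter_append, List.filter_map]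
      by_cases h : c == '_' <;> simp [h, Function.comp]
    | succ m =>
      simp only [List.take_succ_cons, pvPosns, List.filter_append, ih, List.filter_map]
      congr 1
      · by_cases h : c == '_' <;> simp [h]
      · congr 1
        apply List.filter_congr
        intro x _
        simp [Function.comp]

-- pvTrimA cuts exactly at the last underscore
theorem pvTrimA_eq_take (cs : List Char) (q : Nat) (hq : q < cs.length)
    (hc : cs.getD q ' ' = '_') (hlast : ∀ i, q < i → i < cs.length → cs.getD i ' ' ≠ '_') :
    pvTrimA cs = cs.take q := by
  have h3 : cs[q] = '_' := by
    have : cs.getD q ' ' = cs[q] := by simp [List.getD, List.getElem?_eq_getElem hq]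
    rw [← this, hc]
  have hdecomp : cs = cs.take q ++ '_' :: cs.drop (q + 1) := by
    conv_lhs => rw [← List.take_append_drop q cs]
    rw [List.drop_eq_getElem_cons hq, h3]
  have hnotin : ∀ c ∈ cs.drop (q + 1), (c == '_') = false := by
    intro c hcmem
    rw [List.mem_iff_getElem] at hcmem
    obtain ⟨j, hj, rfl⟩ := hcmem
    have hjl : q + 1 + j < cs.length := by
      simp only [List.length_drop] at hj; omega
    have hne := hlast (q + 1 + j) (by omega) hjl
    have hg : cs.getD (q + 1 + j) ' ' = (cs.drop (q+1))[j] := by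
      simp [List.getD, List.getElem?_eq_getElem hjl]
    rw [hg] at hne
    simpa using hne
  unfold pvTrimA
  conv_lhs => rw [hdecomp]
  rw [List.reverse_append, List.reverse_cons, List.append_assoc, List.dropWhile_append]
  have hall : ((cs.drop (q + 1)).reverse.dropWhile fun c => !(c == '_')) = [] := by
    rw [List.dropWhile_eq_nil_iff]
    intro c hcm
    simp [hnotin c (List.mem_reverse.mp hcm)]
  simp only [hall, List.isEmpty_nil, if_true, List.singleton_append, List.dropWhile_cons]
  simp

-- the trimming loop emits the prefixes at the underscore positions, largest first
theorem pvLoopA_spec (k : Nat) (cur : List Char) (out : List (List Char)) :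
    pvLoopA k cur out = out ++ (((pvPosns cur).reverse.take k).map (fun p => cur.take p)) := by
  induction k generalizing cur out with
  | zero => simp [pvLoopA]
  | succ k ih =>
    rw [pvLoopA]
    by_cases h : cur.contains '_' = false
    · rw [if_pos h, (pvPosns_nil_iff cur).mpr h]
      simp
    · rw [if_neg h]
      have hne : pvPosns cur ≠ [] := fun hnil => h ((pvPosns_nil_iff cur).mp hnil)
      obtain ⟨qs, q, hqs⟩ : ∃ qs q, pvPosns cur = qs ++ [q] :=
        ⟨(pvPosns cur).dropLast, (pvPosns cur).getLast hne,
          (List.dropLast_append_getLast hne).symm⟩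
      have hsorted := pvPosns_sorted cur
      rw [hqs] at hsorted
      have hq_lt : q < cur.length := pvPosns_lt_length cur q (by simp [hqs])
      have hq_us : cur.getD q ' ' = '_' := pvPosns_getD cur q (by simp [hqs])
      have hq_last : ∀ i, q < i → i < cur.length → cur.getD i ' ' ≠ '_' := by
        intro i hqi hil hus
        have hi : i ∈ pvPosns cur := pvPosns_complete cur i hil hus
        rw [hqs, List.mem_append] at hi
        rcases hi with hi | hi
        · have : i < q := (List.pairwise_append.mp hsorted).2.2 i hi q (by simp)
          omega
        · simp at hi; omega
      have htrim : pvTrimA cur = cur.take q := pvTrimA_eq_take cur q hq_lt hq_us hq_last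
      have hqslt : ∀ p ∈ qs, p < q := fun p hp =>
        (List.pairwise_append.mp hsorted).2.2 p hp q (by simp)
      have hpostake : pvPosns (cur.take q) = qs := by
        rw [pvPosns_take, hqs, List.filter_append]
        have h1 : qs.filter (fun i => i < q) = qs :=
          List.filter_eq_self.mpr (fun p hp => by simpa using hqslt p hp)
        simp [h1]
      rw [ih, htrim, hpostake, hqs, List.reverse_append]
      simp only [List.reverse_singleton, List.singleton_append, List.take_succ_cons,
        List.map_cons, List.append_assoc, List.singleton_append]
      congr 2
      apply List.map_congr_left
      intro p hp
      have hpq : p < q := hqslt p (List.mem_reverse.mp (List.mem_of_mem_take hp))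
      rw [List.take_take]
      congr 1
      omega

-- the dedup loop is the identity on a Nodup list of unseen elements
theorem pvDedupA_id (xs : List (List Char)) : ∀ (seen : PySem.Set (List Char)) (acc : List (List Char)),
    xs.Nodup → (∀ x ∈ xs, x ∉ seen) → pvDedupA xs seen acc = acc ++ xs := by
  induction xs with
  | nil => intro seen acc _ _; simp [pvDedupA]
  | cons x t ih =>
    intro seen acc hnd hseen
    rw [pvDedupA]
    have hx : seen.contains x = false := by
      rw [← Bool.not_eq_true, PySem.Set.contains_iff]
      exact hseen x (by simp)
    rw [hx]
    simp only [Bool.false_eq_true, if_false]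
    rw [ih (seen.add x) (acc ++ [x]) (List.nodup_cons.mp hnd).2]
    · simp
    · intro y hy
      rw [PySem.Set.mem_add]
      push_neg
      exact ⟨hseen y (by simp [hy]), fun hyx => (List.nodup_cons.mp hnd).1 (hyx ▸ hy)⟩

-- enumerate-filter-map computes the underscore positions (as Ints, shifted by the start)
theorem pvCuts_eq (cs : List Char) (s : Int) :
    (((PySem.List.enumerate cs s).filter (fun p => p.2 == '_')).map Prod.fst)
      = (pvPosns cs).map (fun i : Nat => s + (i : Int)) := by
  induction cs generalizing s with
  | nil => simp [PySem.List.enumerate, pvPosns]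
  | cons c t ih =>
    by_cases h : c == '_' <;>
      simp only [PySem.List.enumerate, pvPosns, h, List.filter_cons, if_true, if_false,
        Bool.false_eq_true, List.nil_append, List.singleton_append, List.map_cons,
        List.map_append, List.map_map, ih, Nat.cast_zero, add_zero] <;>
      [refine congrArg₂ _ rfl ?_; skip] <;>
      · apply List.map_congr_left
        intro i _
        simp [Function.comp]
        push_cast
        ring

-- the final list (before A's dedup) has no duplicates: its members are prefixes of
-- pairwise-distinct lengths
theorem pvFinal_nodup (cs : List Char) (k : Nat) :
    (cs :: (((pvPosns cs).reverse.take k).map (fun p => cs.take p))).Nodup := by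
  have hsorted : ((pvPosns cs).reverse.take k).Pairwise (· > ·) := by
    refine List.Pairwise.sublist (List.take_sublist k _) ?_
    exact List.pairwise_reverse.mpr (pvPosns_sorted cs)
  have hlt : ∀ p ∈ (pvPosns cs).reverse.take k, p < cs.length := fun p hp =>
    pvPosns_lt_length cs p (List.mem_reverse.mp (List.mem_of_mem_take hp))
  have hlen : ∀ p ∈ (pvPosns cs).reverse.take k, (cs.take p).length = p := by
    intro p hp
    have := hlt p hp
    simp only [List.length_take]
    omega
  refine List.nodup_cons.mpr ⟨?_, ?_⟩
  · intro hmem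
    rw [List.mem_map] at hmem
    obtain ⟨p, hp, hpe⟩ := hmem
    have h1 := hlen p hp
    rw [hpe] at h1
    have := hlt p hp
    omega
  · refine List.Nodup.map_on ?_ (hsorted.imp (fun {a b} hab => Nat.ne_of_gt hab))
    intro p hp q hq hpq
    have h1 := hlen p hp
    have h2 := hlen q hq
    rw [← h1, ← h2, hpq]

-- ===== VERDICT (by name: the statement is the Claim_ definition above) =====
theorem iter_motion_key_candidates_py_spec : Claim_equal_iter_motion_key_candidates_py := by
  intro motion_key max_trim_steps _
  unfold Spec_iter_motion_key_candidates_py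
  unfold iter_motion_key_candidates_py iter_motion_key_candidates_py_alt
  simp only []
  set cs := motion_key.toList with hcs
  set t := max_trim_steps.toNat with ht
  -- A's side: the loop emits the prefixes, the dedup is the identity
  rw [pvLoopA_spec t cs [cs]]
  rw [pvDedupA_id _ PySem.Set.empty []
    (by simpa using pvFinal_nodup cs t)
    (by intro x _ hx; simp [PySem.Set.empty] at hx)]
  -- B's side: enumerate/filter finds the positions, the slices are the same prefixes
  rw [pvCuts_eq cs 0]
  have hsteps : (0 : Int) ≤ max 0 max_trim_steps := le_max_left 0 _
  rw [show ((pvPosns cs).map (fun i : Nat => (0 : Int) + (i : Int))).reverse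
        = ((pvPosns cs).reverse).map (fun i : Nat => (i : Int)) by
      rw [← List.map_reverse]; simp]
  rw [PySem.List.slice_to _ hsteps]
  have htn : (max 0 max_trim_steps).toNat = t := by omega
  rw [htn, ← List.map_take, List.map_map]
  simp only [List.map_append, List.map_map, List.map_cons, List.map_nil, List.nil_append,
    List.singleton_append]
  congr 1
  apply List.map_congr_left
  intro p hp
  simp only [Function.comp]
  congr 1
  have hsl : PySem.Chars.slice cs none (some ((p : Nat) : Int)) = List.take ((p : Nat) : Int).toNat cs := by
    simp [PySem.Chars.slice, PySem.List.slice_to _ (Int.natCast_nonneg p)]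
  rw [hsl]
  simp
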